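-- pv_equiv track=rewrite | github.com/requie/Cloud-forensics-agent | reporting_modules/pdf/pdf_reporter.py | _generate_recommendations_html
-- ===== SOURCE A (Python) =====
-- from typing import Any, Dict, List, Optional, Union
--
-- def _generate_recommendations_html(recommendations: List[Dict[str, Any]]) -> str:
--     """
--     Generate HTML for recommendations.
--
--     Args:
--         recommendations: List of recommendation dictionaries
--
--     Returns:
--         HTML string for recommendations
--     """
--     if not recommendations:
--         return '<p>No recommendations available.</p>'
--
--     html_parts = ['<div class="recommendations-section">']
--
--     # Group recommendations by category
--     recommendations_by_category = {}
--     for recommendation in recommendations: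
--         category = recommendation.get('category', 'general')
--         if category not in recommendations_by_category:
--             recommendations_by_category[category] = []
--         recommendations_by_category[category].append(recommendation)
--
--     # Create sections for each category
--     for category, category_recommendations in recommendations_by_category.items():
--         html_parts.append(f'<h3>{category.capitalize()} Recommendations ({len(category_recommendations)})</h3>')
--         html_parts.append('<div class="subsection">')
--
--         html_parts.append('<table>')
--         html_parts.append('<tr><th>Priority</th><th>Recommendation</th><th>Description</th></tr>')
--
--         # Sort recommendations by priority
--         priority_order = {'high': 0, 'medium': 1, 'low': 2}
--         category_recommendations.sort(key=lambda x: priority_order.get(x.get('priority', 'low'), 3))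
--
--         for recommendation in category_recommendations:
--             priority = recommendation.get('priority', 'medium')
--             title = recommendation.get('title', 'No title available')
--             description = recommendation.get('description', 'No description available')
--
--             html_parts.append(f'<tr class="priority-{priority}">')
--             html_parts.append(f'<td><span class="severity-{priority}">{priority.upper()}</span></td>')
--             html_parts.append(f'<td><strong>{title}</strong></td>')
--             html_parts.append(f'<td>{description}</td>')
--             html_parts.append(f'</tr>')
--
--         html_parts.append('</table>')
--         html_parts.append('</div>')
--
--     html_parts.append('</div>')
--
--     return '\n'.join(html_parts)
-- ===== SOURCE B (Python) =====
-- from typing import Any, Dict, List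
--
-- _RANK = {'high': 0, 'medium': 1, 'low': 2}
--
--
-- def _rank(rec: Dict[str, Any]) -> int:
--     return _RANK.get(rec.get('priority', 'low'), 3)
--
--
-- def _row(rec: Dict[str, Any]) -> str:
--     priority = rec.get('priority', 'medium')
--     title = rec.get('title', 'No title available')
--     description = rec.get('description', 'No description available')
--     return (f'<tr class="priority-{priority}">\n'
--             f'<td><span class="severity-{priority}">{priority.upper()}</span></td>\n'
--             f'<td><strong>{title}</strong></td>\n'
--             f'<td>{description}</td>\n'
--             f'</tr>')
--
--
-- def _sections(recs: List[Dict[str, Any]]) -> List[str]: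
--     # Recursive partition: peel off the first category, render it, recurse on the rest.
--     if not recs:
--         return []
--     cat = recs[0].get('category', 'general')
--     same = [r for r in recs if r.get('category', 'general') == cat]
--     rest = [r for r in recs if r.get('category', 'general') != cat]
--     rows = '\n'.join(_row(r) for r in sorted(same, key=_rank))
--     section = (f'<h3>{cat.capitalize()} Recommendations ({len(same)})</h3>\n'
--                '<div class="subsection">\n'
--                '<table>\n'
--                '<tr><th>Priority</th><th>Recommendation</th><th>Description</th></tr>\n'
--                f'{rows}\n'
--                '</table>\n'
--                '</div>')
--     return [section] + _sections(rest)
--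
--
-- def _generate_recommendations_html(recommendations: List[Dict[str, Any]]) -> str:
--     if not recommendations:
--         return '<p>No recommendations available.</p>'
--     return '\n'.join(['<div class="recommendations-section">']
--                      + _sections(recommendations)
--                      + ['</div>'])
-- ===== Notes on version B (the rewrite author's own statement) =====
-- stated objective: alternative
-- what changed: B replaces A's dict-accumulation grouping and flat parts-list building with a recursive partition: it peels off the first record's category, filters the list into that category and the rest, renders each category section as one string (rows sorted with the same priority key), and recurses; the output is assembled by joining whole section strings instead of appending many small parts.
import Mathlib
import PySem

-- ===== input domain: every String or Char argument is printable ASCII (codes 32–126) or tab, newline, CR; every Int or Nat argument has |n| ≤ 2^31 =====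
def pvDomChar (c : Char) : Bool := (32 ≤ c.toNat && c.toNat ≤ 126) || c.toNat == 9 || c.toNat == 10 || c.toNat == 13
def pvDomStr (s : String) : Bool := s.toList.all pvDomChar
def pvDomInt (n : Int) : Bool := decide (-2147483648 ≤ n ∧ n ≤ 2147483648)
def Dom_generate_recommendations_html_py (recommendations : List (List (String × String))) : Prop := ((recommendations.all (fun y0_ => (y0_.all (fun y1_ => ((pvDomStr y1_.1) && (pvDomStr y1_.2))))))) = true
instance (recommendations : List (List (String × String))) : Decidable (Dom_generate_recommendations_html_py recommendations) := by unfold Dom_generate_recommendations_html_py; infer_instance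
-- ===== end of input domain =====

-- B replaces A's dict-accumulation grouping with a recursive partition by the first record's
-- category, rendering each section as one joined string (objective: alternative decomposition).

-- Shared stand-ins for Python built-ins PySem does not provide:
-- rec.get(k, dflt) on a dict given as an association list (first-match lookup) — exact.
def pyDictGetD (rec : List (String × String)) (k dflt : String) : String :=
  (PySem.Dict.mk rec).getD k dflt

-- str.capitalize() — exact on the ASCII domain (first char uppercased, rest lowercased).
def pyCapitalize (s : String) : String :=
  match s.toList with
  | [] => ""
  | c :: t => String.ofList (PySem.Chars.upperChar c :: PySem.Chars.lower t)

-- {'high': 0, 'medium': 1, 'low': 2}.get(p, 3) — both sources build exactly this lookup.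
def priorityRank (p : String) : Int :=
  (PySem.Dict.mk [("high", (0 : Int)), ("medium", 1), ("low", 2)]).getD p 3

-- recommendation.get('category', 'general') — used identically by both sources.
def pyCat (r : List (String × String)) : String := pyDictGetD r "category" "general"

-- ===== PORT A =====
def rowPartsA (r : List (String × String)) : List String :=
  let priority := pyDictGetD r "priority" "medium"
  let title := pyDictGetD r "title" "No title available"
  let description := pyDictGetD r "description" "No description available"
  ["<tr class=\"priority-" ++ priority ++ "\">",
   "<td><span class=\"severity-" ++ priority ++ "\">" ++ PySem.Str.upper priority ++ "</span></td>",
   "<td><strong>" ++ title ++ "</strong></td>",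
   "<td>" ++ description ++ "</td>",
   "</tr>"]

def generate_recommendations_html_py (recommendations : List (List (String × String))) : String :=
  if recommendations = [] then "<p>No recommendations available.</p>"
  else
    let htmlParts : List String := ["<div class=\"recommendations-section\">"]
    let byCategory := recommendations.foldl
      (fun d r => d.modify (pyCat r) [] (fun v => v ++ [r])) PySem.Dict.empty
    let htmlParts := byCategory.items.foldl (fun parts kv =>
      let sortedRecs := PySem.List.sorted kv.2
        (fun r => priorityRank (pyDictGetD r "priority" "low")) false
      (sortedRecs.foldl (fun parts r => parts ++ rowPartsA r)
        (parts ++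
          ["<h3>" ++ pyCapitalize kv.1 ++ " Recommendations (" ++
             PySem.Int.toStr (kv.2.length : Int) ++ ")</h3>",
           "<div class=\"subsection\">",
           "<table>",
           "<tr><th>Priority</th><th>Recommendation</th><th>Description</th></tr>"]))
      ++ ["</table>", "</div>"]) htmlParts
    PySem.Str.join "\n" (htmlParts ++ ["</div>"])

-- ===== PORT B =====
def rowB (r : List (String × String)) : String :=
  let priority := pyDictGetD r "priority" "medium"
  let title := pyDictGetD r "title" "No title available"
  let description := pyDictGetD r "description" "No description available"
  "<tr class=\"priority-" ++ priority ++ "\">" ++ "\n" ++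
  "<td><span class=\"severity-" ++ priority ++ "\">" ++ PySem.Str.upper priority ++ "</span></td>" ++ "\n" ++
  "<td><strong>" ++ title ++ "</strong></td>" ++ "\n" ++
  "<td>" ++ description ++ "</td>" ++ "\n" ++
  "</tr>"

def sectionB (cat : String) (same : List (List (String × String))) : String :=
  let rows := PySem.Str.join "\n"
    ((PySem.List.sorted same (fun r => priorityRank (pyDictGetD r "priority" "low")) false).map rowB)
  "<h3>" ++ pyCapitalize cat ++ " Recommendations (" ++
    PySem.Int.toStr (same.length : Int) ++ ")</h3>" ++ "\n" ++
  "<div class=\"subsection\">" ++ "\n" ++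
  "<table>" ++ "\n" ++
  "<tr><th>Priority</th><th>Recommendation</th><th>Description</th></tr>" ++ "\n" ++
  rows ++ "\n" ++
  "</table>" ++ "\n" ++
  "</div>"

def sectionsB : List (List (String × String)) → List String
  | [] => []
  | r :: rest =>
    let cat := pyCat r
    let same := (r :: rest).filter (fun x => pyCat x == cat)
    let restOther := (r :: rest).filter (fun x => !(pyCat x == cat))
    sectionB cat same :: sectionsB restOther
termination_by recs => recs.length
decreasing_by
  simp only [List.filter_cons, beq_self_eq_true, Bool.not_true, Bool.false_eq_true, if_false]
  exact Nat.lt_succ_of_le (List.length_filter_le _ _)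

def generate_recommendations_html_py_alt (recommendations : List (List (String × String))) : String :=
  if recommendations = [] then "<p>No recommendations available.</p>"
  else
    PySem.Str.join "\n"
      (["<div class=\"recommendations-section\">"] ++ sectionsB recommendations ++ ["</div>"])

-- ===== PRECONDITION & SPEC =====
def Spec_generate_recommendations_html_py (recommendations : List (List (String × String))) (out : String) : Prop := out = generate_recommendations_html_py_alt recommendations
instance (recommendations : List (List (String × String))) (out : String) : Decidable (Spec_generate_recommendations_html_py recommendations out) := by unfold Spec_generate_recommendations_html_py; infer_instance

-- ===== CLAIM (what is proved, stated in full; the proofs are below) =====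
def Claim_equal_generate_recommendations_html_py : Prop := ∀ (recommendations : List (List (String × String))), Dom_generate_recommendations_html_py recommendations → Spec_generate_recommendations_html_py recommendations (generate_recommendations_html_py recommendations)

-- ===== LEMMAS AND PROOFS =====

-- A's parts for one category section (used only by the proofs).
def secParts (cat : String) (same : List (List (String × String))) : List String :=
  ["<h3>" ++ pyCapitalize cat ++ " Recommendations (" ++
     PySem.Int.toStr (same.length : Int) ++ ")</h3>",
   "<div class=\"subsection\">",
   "<table>",
   "<tr><th>Priority</th><th>Recommendation</th><th>Description</th></tr>"] ++
  (PySem.List.sorted same (fun r => priorityRank (pyDictGetD r "priority" "low")) false).flatMap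
    rowPartsA ++
  ["</table>", "</div>"]

lemma chars_join_append (sep : List Char) (xs ys : List (List Char)) (hx : xs ≠ []) (hy : ys ≠ []) :
    PySem.Chars.join sep (xs ++ ys) = PySem.Chars.join sep xs ++ sep ++ PySem.Chars.join sep ys := by
  induction xs with
  | nil => exact absurd rfl hx
  | cons a t ih =>
    obtain ⟨b, ys', rfl⟩ : ∃ b ys', ys = b :: ys' := by
      cases ys with | nil => exact absurd rfl hy | cons b ys' => exact ⟨b, ys', rfl⟩
    cases t with
    | nil => simp [PySem.Chars.join_cons_cons, PySem.Chars.join_singleton]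
    | cons c t' =>
      rw [List.cons_append, List.cons_append, PySem.Chars.join_cons_cons,
        PySem.Chars.join_cons_cons, ← List.cons_append, ih (by simp)]
      simp [List.append_assoc]

lemma strJoin_append (sep : String) (xs ys : List String) (hx : xs ≠ []) (hy : ys ≠ []) :
    PySem.Str.join sep (xs ++ ys) = PySem.Str.join sep xs ++ sep ++ PySem.Str.join sep ys := by
  apply String.toList_inj.mp
  simp only [PySem.Str.toList_join, String.toList_append, List.map_append]
  rw [chars_join_append sep.toList _ _ (by simpa using hx) (by simpa using hy)]

lemma strJoin_singleton (sep a : String) : PySem.Str.join sep [a] = a := by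
  apply String.toList_inj.mp
  simp [PySem.Str.toList_join, PySem.Chars.join_singleton]

lemma strJoin_cons_cons (sep a b : String) (t : List String) :
    PySem.Str.join sep (a :: b :: t) = a ++ sep ++ PySem.Str.join sep (b :: t) := by
  have := strJoin_append sep [a] (b :: t) (by simp) (by simp)
  simpa [strJoin_singleton] using this

lemma rowPartsA_ne_nil (r : List (String × String)) : rowPartsA r ≠ [] := by
  simp [rowPartsA]

lemma strJoin_flatten (gs : List (List String)) (h : ∀ g ∈ gs, g ≠ []) :
    PySem.Str.join "\n" gs.flatten = PySem.Str.join "\n" (gs.map (PySem.Str.join "\n")) := by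
  induction gs with
  | nil => simp
  | cons g t ih =>
    cases t with
    | nil => simp [strJoin_singleton]
    | cons g2 t2 =>
      have hg : g ≠ [] := h g (by simp)
      have hg2 : g2 ≠ [] := h g2 (by simp)
      have hfl : (g2 :: t2).flatten ≠ [] := by
        cases g2 with
        | nil => exact absurd rfl hg2
        | cons c cs => simp
      rw [List.flatten_cons, strJoin_append _ _ _ hg hfl,
        ih (fun x hx => h x (by simp [hx])), List.map_cons, List.map_cons,
        List.map_cons, strJoin_cons_cons]

lemma row_eq (r : List (String × String)) : PySem.Str.join "\n" (rowPartsA r) = rowB r := by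
  simp only [rowPartsA, rowB, strJoin_cons_cons, strJoin_singleton, String.append_assoc]

lemma section_eq (cat : String) (same : List (List (String × String))) (h : same ≠ []) :
    PySem.Str.join "\n" (secParts cat same) = sectionB cat same := by
  unfold secParts
  set key : List (String × String) → Int := fun r => priorityRank (pyDictGetD r "priority" "low") with hkey
  have hs : PySem.List.sorted same key false ≠ [] := by
    rw [Ne, PySem.List.sorted_eq_nil_iff]; exact h
  have hfl : (PySem.List.sorted same key false).flatMap rowPartsA ≠ [] := by
    obtain ⟨a, t, he⟩ : ∃ a t, PySem.List.sorted same key false = a :: t := by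
      cases hsy : PySem.List.sorted same key false with
      | nil => exact absurd hsy hs
      | cons a t => exact ⟨a, t, rfl⟩
    rw [he, List.flatMap_cons]
    exact List.append_ne_nil_of_left_ne_nil (rowPartsA_ne_nil a) _
  have hrows : PySem.Str.join "\n" ((PySem.List.sorted same key false).flatMap rowPartsA) =
      PySem.Str.join "\n" ((PySem.List.sorted same key false).map rowB) := by
    have h1 := strJoin_flatten ((PySem.List.sorted same key false).map rowPartsA)
      (by intro g hg; obtain ⟨r, _, rfl⟩ := List.mem_map.mp hg; exact rowPartsA_ne_nil r)
    rw [← List.flatMap_def] at h1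
    rw [h1, List.map_map]
    exact congrArg _ (List.map_congr_left (fun r _ => row_eq r))
  rw [strJoin_append _ _ _ (List.append_ne_nil_of_left_ne_nil (by simp) _) (by simp),
    strJoin_append _ _ _ (by simp) hfl, hrows]
  simp only [sectionB, strJoin_cons_cons, strJoin_singleton, String.append_assoc]
  rw [← hkey]

lemma byCat_items (recs : List (List (String × String))) :
    (recs.foldl (fun d r => d.modify (pyCat r) [] (fun v => v ++ [r])) PySem.Dict.empty).items =
      (PySem.Set.ofList (recs.map pyCat)).map
        (fun c => (c, recs.filter (fun r => pyCat r == c))) := by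
  have hnd : (recs.foldl (fun d r => d.modify (pyCat r) [] (fun v => v ++ [r]))
      PySem.Dict.empty).keys.Nodup :=
    PySem.Dict.nodup_keys_foldl_modify_key recs pyCat [] (fun _ r => fun v => v ++ [r]) _
      PySem.Dict.nodup_keys_empty
  have hkeys : (recs.foldl (fun d r => d.modify (pyCat r) [] (fun v => v ++ [r]))
      PySem.Dict.empty).keys = PySem.Set.ofList (recs.map pyCat) := by
    rw [PySem.Dict.keys_foldl_modify_key recs pyCat [] (fun _ r => fun v => v ++ [r])
      PySem.Dict.empty, PySem.Dict.keys_empty]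
    rfl
  have hget : ∀ c, (recs.foldl (fun d r => d.modify (pyCat r) [] (fun v => v ++ [r]))
      PySem.Dict.empty).getD c [] = recs.filter (fun r => pyCat r == c) := by
    intro c
    rw [show (recs.foldl (fun d r => d.modify (pyCat r) [] (fun v => v ++ [r]))
        PySem.Dict.empty) = ((recs.map (fun r => (pyCat r, r))).foldl
        (fun d p => d.modify p.1 [] (fun v => v ++ [p.2])) PySem.Dict.empty) from
      (List.foldl_map (f := fun r => (pyCat r, r))
        (g := fun d p => PySem.Dict.modify d p.1 [] (fun v => v ++ [p.2]))
        (l := recs) (init := PySem.Dict.empty)).symm]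
    rw [PySem.Dict.getD_foldl_modify_append]
    simp [List.filter_map, Function.comp_def, List.map_map]
  rw [PySem.Dict.items_eq_map_keys _ hnd [], hkeys]
  exact List.map_congr_left (fun c _ => by rw [hget c])

lemma A_norm (recs : List (List (String × String))) (h : recs ≠ []) :
    generate_recommendations_html_py recs =
      PySem.Str.join "\n"
        (["<div class=\"recommendations-section\">"] ++
          (PySem.Set.ofList (recs.map pyCat)).flatMap
            (fun c => secParts c (recs.filter (fun r => pyCat r == c))) ++
          ["</div>"]) := by
  simp only [generate_recommendations_html_py, if_neg h]
  have hbody : ∀ (parts : List String) (kv : String × List (List (String × String))),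
      ((PySem.List.sorted kv.2 (fun r => priorityRank (pyDictGetD r "priority" "low"))
          false).foldl (fun parts r => parts ++ rowPartsA r)
        (parts ++
          ["<h3>" ++ pyCapitalize kv.1 ++ " Recommendations (" ++
             PySem.Int.toStr (kv.2.length : Int) ++ ")</h3>",
           "<div class=\"subsection\">",
           "<table>",
           "<tr><th>Priority</th><th>Recommendation</th><th>Description</th></tr>"]))
      ++ ["</table>", "</div>"] = parts ++ secParts kv.1 kv.2 := by
    intro parts kv
    rw [PySem.List.foldl_append_eq_flatMap]
    simp [secParts, List.append_assoc]
  rw [PySem.List.foldl_congr_mem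
      (l := (List.foldl (fun d r => d.modify (pyCat r) [] fun v => v ++ [r])
        PySem.Dict.empty recs).items)
      (g := fun parts kv => parts ++ secParts kv.1 kv.2)
      (init := ["<div class=\"recommendations-section\">"])
      (f := fun parts kv =>
        List.foldl (fun parts r => parts ++ rowPartsA r)
            (parts ++
              ["<h3>" ++ pyCapitalize kv.1 ++ " Recommendations (" ++
                 PySem.Int.toStr (kv.2.length : Int) ++ ")</h3>",
               "<div class=\"subsection\">", "<table>",
               "<tr><th>Priority</th><th>Recommendation</th><th>Description</th></tr>"])
            (PySem.List.sorted kv.2 fun r => priorityRank (pyDictGetD r "priority" "low")) ++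
          ["</table>", "</div>"])
      (fun acc x _ => hbody acc x)]
  simp only [PySem.List.foldl_append_eq_flatMap]
  rw [byCat_items]
  simp only [List.flatMap_map]

lemma update_filter {α : Type} [BEq α] [LawfulBEq α] :
    ∀ (l : List α) (s : PySem.Set α) (x : α), x ∈ s →
      PySem.Set.update s l = PySem.Set.update s (l.filter (fun y => !(y == x))) := by
  intro l
  induction l with
  | nil => intro s x _; rfl
  | cons y t ih =>
    intro s x hx
    by_cases hyx : (y == x) = true
    · have : y = x := eq_of_beq hyx
      subst this
      have hc : PySem.Set.contains s y = true := by
        simpa [PySem.Set.contains] using hx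
      rw [show ((y :: t).filter (fun z => !(z == y))) = t.filter (fun z => !(z == y)) from by simp]
      show PySem.Set.update (PySem.Set.add s y) t = _
      unfold PySem.Set.add
      rw [if_pos hc]
      exact ih s y hx
    · have hyx' : (y == x) = false := by simpa using hyx
      simp only [List.filter_cons, hyx', Bool.not_false]
      show PySem.Set.update (PySem.Set.add s y) t =
        PySem.Set.update (PySem.Set.add s y) (t.filter (fun z => !(z == x)))
      exact ih _ x ((PySem.Set.mem_add s y x).mpr (Or.inl hx))

lemma update_cons_head {α : Type} [BEq α] [LawfulBEq α] :
    ∀ (l : List α) (s : PySem.Set α) (x : α), (∀ y ∈ l, (y == x) = false) →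
      PySem.Set.update (x :: s) l = x :: PySem.Set.update s l := by
  intro l
  induction l with
  | nil => intro s x _; rfl
  | cons y t ih =>
    intro s x h
    have hxy : (x == y) = false := by
      have hyx := h y (by simp)
      simp only [beq_eq_false_iff_ne] at hyx ⊢
      exact fun he => hyx he.symm
    show PySem.Set.update (PySem.Set.add (x :: s) y) t = x :: PySem.Set.update (PySem.Set.add s y) t
    unfold PySem.Set.add
    rw [show PySem.Set.contains (x :: s) y = PySem.Set.contains s y by
      simp [PySem.Set.contains, h y (by simp)]]
    by_cases hcs : s.contains y = true
    · rw [if_pos hcs, if_pos hcs]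
      exact ih s x (fun z hz => h z (by simp [hz]))
    · rw [if_neg hcs, if_neg hcs, List.cons_append]
      exact ih (s ++ [y]) x (fun z hz => h z (by simp [hz]))

lemma ofList_cons {α : Type} [BEq α] [LawfulBEq α] (x : α) (l : List α) :
    PySem.Set.ofList (x :: l) = x :: PySem.Set.ofList (l.filter (fun y => !(y == x))) := by
  show PySem.Set.update (PySem.Set.add PySem.Set.empty x) l = _
  have : PySem.Set.add PySem.Set.empty x = [x] := rfl
  rw [this, update_filter l [x] x (by simp)]
  rw [update_cons_head _ [] x (fun y hy => by
    have := List.of_mem_filter hy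
    simpa using this)]
  rfl

lemma sectionsB_eq (recs : List (List (String × String))) :
    sectionsB recs =
      (PySem.Set.ofList (recs.map pyCat)).map
        (fun c => sectionB c (recs.filter (fun x => pyCat x == c))) := by
  induction recs using sectionsB.induct with
  | case1 => simp [sectionsB]
  | case2 r rest cat restOther ih =>
    have hcat : cat = pyCat r := rfl
    have hro : restOther = rest.filter (fun x => !(pyCat x == pyCat r)) := by
      show (r :: rest).filter _ = _
      simp [hcat]
    rw [hro] at ih
    have hunf : sectionsB (r :: rest) =
        sectionB (pyCat r) ((r :: rest).filter (fun x => pyCat x == pyCat r)) ::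
          sectionsB (rest.filter (fun x => !(pyCat x == pyCat r))) := by
      simp only [sectionsB]
      rw [show (r :: rest).filter (fun x => !(pyCat x == pyCat r)) =
          rest.filter (fun x => !(pyCat x == pyCat r)) from by simp]
    rw [hunf, List.map_cons, ofList_cons, List.map_cons]
    refine List.cons_eq_cons.mpr ⟨rfl, ?_⟩
    have hst : (List.map pyCat rest).filter (fun y => !(y == pyCat r)) =
        (rest.filter (fun x => !(pyCat x == pyCat r))).map pyCat := by
      rw [List.filter_map]
      simp [Function.comp_def]
    rw [hst, ih]
    apply List.map_congr_left
    intro c hc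
    have hcne : c ≠ pyCat r := by
      have hmem : c ∈ (rest.filter (fun x => !(pyCat x == pyCat r))).map pyCat := by
        simpa using
          (PySem.Set.mem_ofList ((rest.filter (fun x => !(pyCat x == pyCat r))).map pyCat) c).mp hc
      obtain ⟨z, hz, rfl⟩ := List.mem_map.mp hmem
      have := List.of_mem_filter hz
      simpa using this
    show sectionB c _ = sectionB c _
    refine congrArg (sectionB c) ?_
    rw [List.filter_cons, if_neg (by simp [show ¬ pyCat r = c from fun he => hcne he.symm]),
      List.filter_filter]
    apply List.filter_congr
    intro x _
    by_cases hxc : (pyCat x == c) = true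
    · have : pyCat x = c := eq_of_beq hxc
      simp [this, show ¬ c = pyCat r from hcne]
    · simp [show (pyCat x == c) = false by simpa using hxc]

-- ===== VERDICT (by name: the statement is the Claim_ definition above) =====
theorem generate_recommendations_html_py_spec : Claim_equal_generate_recommendations_html_py := by
  intro recs _
  unfold Spec_generate_recommendations_html_py
  by_cases h : recs = []
  · subst h; rfl
  · rw [A_norm recs h,
      show generate_recommendations_html_py_alt recs =
        PySem.Str.join "\n"
          (["<div class=\"recommendations-section\">"] ++ sectionsB recs ++ ["</div>"]) from by
        simp only [generate_recommendations_html_py_alt, if_neg h],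
      sectionsB_eq]
    have hgs := strJoin_flatten
      ([["<div class=\"recommendations-section\">"]] ++
        (PySem.Set.ofList (recs.map pyCat)).map
          (fun c => secParts c (recs.filter (fun r => pyCat r == c))) ++ [["</div>"]])
      (by
        intro g hg
        rcases List.mem_append.mp hg with hg | hg
        · rcases List.mem_append.mp hg with hg | hg
          · simp only [List.mem_singleton] at hg
            subst hg; simp
          · obtain ⟨c, _, rfl⟩ := List.mem_map.mp hg
            simp [secParts]
        · simp only [List.mem_singleton] at hg
          subst hg; simp)
    have hflat : ([["<div class=\"recommendations-section\">"]] ++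
        (PySem.Set.ofList (recs.map pyCat)).map
          (fun c => secParts c (recs.filter (fun r => pyCat r == c))) ++ [["</div>"]]).flatten =
        ["<div class=\"recommendations-section\">"] ++
          (PySem.Set.ofList (recs.map pyCat)).flatMap
            (fun c => secParts c (recs.filter (fun r => pyCat r == c))) ++ ["</div>"] := by
      simp [List.flatten_append, List.flatMap_def]
    rw [hflat] at hgs
    rw [hgs]
    refine congrArg (PySem.Str.join "\n") ?_
    simp only [List.map_append, List.map_map, List.map_cons, List.map_nil, strJoin_singleton]
    refine congrArg (fun m => ["<div class=\"recommendations-section\">"] ++ m ++ ["</div>"]) ?_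
    apply List.map_congr_left
    intro c hc
    have hne : recs.filter (fun r => pyCat r == c) ≠ [] := by
      have hmem : c ∈ recs.map pyCat := by
        simpa using (PySem.Set.mem_ofList (recs.map pyCat) c).mp hc
      obtain ⟨r, hr, rfl⟩ := List.mem_map.mp hmem
      exact List.ne_nil_of_mem (List.mem_filter.mpr ⟨hr, by simp⟩)
    exact section_eq c _ hne
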